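-- pv_equiv track=rewrite | github.com/vuthuonghai-steve/KLTN-By_Thuong_Hai-Steve | .agent/skills/ui-pencil-drawer/scripts/scan_lib_components.py | fuzzy_match_component
-- ===== SOURCE A (Python) =====
-- from typing import Optional
--
-- def fuzzy_match_component(query: str, component_map: dict) -> Optional[str]:
--     """
--     Find best-matching component nodeId for a given query name.
--     Used when exact name doesn't exist in component_map.
--
--     Strategy:
--       1. Exact match (case-insensitive)
--       2. Prefix match
--       3. Substring match
--       4. Return None if no match
--
--     Args:
--         query: Component name to search for (e.g., "input-email", "InputText")
--         component_map: Dict from scan_reusable_nodes()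
--
--     Returns:
--         str: node ID of best match, or None
--     """
--     query_normalized = query.lower().replace('-', '').replace('_', '').replace(' ', '')
--
--     # Pass 1: Exact match (case-insensitive)
--     for name, node_id in component_map.items():
--         if name.startswith('__id_'):
--             continue
--         if name.lower() == query.lower():
--             return node_id
--
--     # Pass 2: Normalized exact match
--     for name, node_id in component_map.items():
--         if name.startswith('__id_'):
--             continue
--         name_normalized = name.lower().replace('-', '').replace('_', '').replace(' ', '')
--         if name_normalized == query_normalized:
--             return node_id
--
--     # Pass 3: Substring match (query is contained in name OR name in query)
--     matches = []
--     for name, node_id in component_map.items():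
--         if name.startswith('__id_'):
--             continue
--         name_normalized = name.lower().replace('-', '').replace('_', '').replace(' ', '')
--         if query_normalized in name_normalized or name_normalized in query_normalized:
--             matches.append((name, node_id))
--
--     if matches:
--         # Return shortest match (most specific)
--         matches.sort(key=lambda x: len(x[0]))
--         return matches[0][1]
--
--     return None
-- ===== SOURCE B (Python) =====
-- from typing import Optional
--
--
-- def _normalize(s: str) -> str:
--     return s.lower().replace('-', '').replace('_', '').replace(' ', '')
--
--
-- def fuzzy_match_component(query: str, component_map: dict) -> Optional[str]:
--     """One pass over component_map keeping three accumulators (exact,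
--     normalized, shortest substring match) instead of three passes + a sort."""
--     query_lower = query.lower()
--     query_normalized = _normalize(query)
--
--     exact_id = None        # first case-insensitive exact match
--     normalized_id = None   # first normalized exact match
--     best = None            # (len(name), node_id) of first shortest substring match
--
--     for name, node_id in component_map.items():
--         if name.startswith('__id_'):
--             continue
--         if exact_id is None and name.lower() == query_lower:
--             exact_id = node_id
--         name_normalized = _normalize(name)
--         if normalized_id is None and name_normalized == query_normalized:
--             normalized_id = node_id
--         if query_normalized in name_normalized or name_normalized in query_normalized:
--             if best is None or len(name) < best[0]:
--                 best = (len(name), node_id)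
--
--     if exact_id is not None:
--         return exact_id
--     if normalized_id is not None:
--         return normalized_id
--     if best is not None:
--         return best[1]
--     return None
-- ===== Notes on version B (the rewrite author's own statement) =====
-- stated objective: simpler
-- what changed: Replaced A's three separate passes over component_map plus building a matches list and stably sorting it by a single loop that keeps three accumulators (first exact match, first normalized match, running shortest substring match), normalizing each name once.
import Mathlib
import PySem

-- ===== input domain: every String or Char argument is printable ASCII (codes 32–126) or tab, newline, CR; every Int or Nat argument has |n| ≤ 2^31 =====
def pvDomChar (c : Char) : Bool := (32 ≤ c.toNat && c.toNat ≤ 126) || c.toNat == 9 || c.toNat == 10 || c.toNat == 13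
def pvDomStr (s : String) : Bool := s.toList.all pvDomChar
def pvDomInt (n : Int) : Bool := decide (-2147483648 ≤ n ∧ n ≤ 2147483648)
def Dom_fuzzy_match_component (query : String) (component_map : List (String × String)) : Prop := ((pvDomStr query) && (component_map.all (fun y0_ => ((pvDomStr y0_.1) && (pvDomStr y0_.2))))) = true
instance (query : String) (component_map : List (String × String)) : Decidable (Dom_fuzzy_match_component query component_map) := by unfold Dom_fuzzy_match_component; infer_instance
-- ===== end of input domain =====

-- B replaces A's three passes plus a stable sort by a single loop keeping three
-- accumulators (first exact, first normalized, first-shortest substring match); objective: simpler one-pass decomposition.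

-- ===== PORT A =====
-- s.lower().replace('-','').replace('_','').replace(' ','') — the normalization expression both Pythons compute
def pvNorm (s : String) : String :=
  PySem.Str.replace (PySem.Str.replace (PySem.Str.replace (PySem.Str.lower s) "-" "") "_" "") " " ""

-- Pass 1 of A: first non-'__id_' entry with name.lower() == query.lower()
def pvPass1 (qlow : String) : List (String × String) → Option String
  | [] => none
  | (name, nid) :: rest =>
    if PySem.Str.startswith name "__id_" then pvPass1 qlow rest
    else if PySem.Str.lower name == qlow then some nid
    else pvPass1 qlow rest

-- Pass 2 of A: first non-'__id_' entry whose normalized name equals the normalized query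
def pvPass2 (qnorm : String) : List (String × String) → Option String
  | [] => none
  | (name, nid) :: rest =>
    if PySem.Str.startswith name "__id_" then pvPass2 qnorm rest
    else if pvNorm name == qnorm then some nid
    else pvPass2 qnorm rest

def fuzzy_match_component (query : String) (component_map : List (String × String)) : Option String :=
  match pvPass1 (PySem.Str.lower query) component_map with
  | some r => some r
  | none =>
    match pvPass2 (pvNorm query) component_map with
    | some r => some r
    | none =>
      -- Pass 3: collect substring matches (matches.append), sort stably by len(name), take matches[0][1]
      match PySem.List.sorted (component_map.foldl (fun acc p =>
          if PySem.Str.startswith p.1 "__id_" then acc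
          else if PySem.Str.isIn (pvNorm query) (pvNorm p.1) || PySem.Str.isIn (pvNorm p.1) (pvNorm query) then
            acc ++ [p]
          else acc) []) (fun x => PySem.Str.len x.1) with
      | m :: _ => some m.2
      | [] => none

-- ===== PORT B =====
-- loop body of B: state = (exact_id, normalized_id, best); best = (len(name), node_id)
def pvStep (qlow qnorm : String) (st : Option String × Option String × Option (Int × String))
    (p : String × String) : Option String × Option String × Option (Int × String) :=
  if PySem.Str.startswith p.1 "__id_" then st
  else
    let e := if st.1.isNone && (PySem.Str.lower p.1 == qlow) then some p.2 else st.1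
    let nn := pvNorm p.1
    let n := if st.2.1.isNone && (nn == qnorm) then some p.2 else st.2.1
    let b := if PySem.Str.isIn qnorm nn || PySem.Str.isIn nn qnorm then
        match st.2.2 with
        | none => some (PySem.Str.len p.1, p.2)
        | some q => if PySem.Str.len p.1 < q.1 then some (PySem.Str.len p.1, p.2) else st.2.2
      else st.2.2
    (e, n, b)

def fuzzy_match_component_alt (query : String) (component_map : List (String × String)) : Option String :=
  match component_map.foldl (pvStep (PySem.Str.lower query) (pvNorm query)) (none, none, none) with
  | (some r, _, _) => some r
  | (none, some r, _) => some r
  | (none, none, b) => b.map Prod.snd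

-- ===== PRECONDITION & SPEC =====
def Spec_fuzzy_match_component (query : String) (component_map : List (String × String)) (out : Option String) : Prop := out = fuzzy_match_component_alt query component_map
instance (query : String) (component_map : List (String × String)) (out : Option String) : Decidable (Spec_fuzzy_match_component query component_map out) := by unfold Spec_fuzzy_match_component; infer_instance

-- ===== CLAIM (what is proved, stated in full; the proofs are below) =====
def Claim_equal_fuzzy_match_component : Prop := ∀ (query : String) (component_map : List (String × String)), Dom_fuzzy_match_component query component_map → Spec_fuzzy_match_component query component_map (fuzzy_match_component query component_map)

-- ===== LEMMAS AND PROOFS =====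

-- proof-only helpers
def pvKlen (x : String × String) : Int := PySem.Str.len x.1
def pvKV (x : String × String) : Int × String := (pvKlen x, x.2)
-- one min-update step of B's `best` accumulator
def pvMin (b : Option (Int × String)) (x : String × String) : Option (Int × String) :=
  match b with
  | none => some (pvKV x)
  | some q => if pvKlen x < q.1 then some (pvKV x) else b
-- the substring matches of A's pass 3, as a filter
def pvMatchesF (qnorm : String) (cm : List (String × String)) : List (String × String) :=
  cm.filter (fun p => !PySem.Str.startswith p.1 "__id_" &&
    (PySem.Str.isIn qnorm (pvNorm p.1) || PySem.Str.isIn (pvNorm p.1) qnorm))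

lemma pass1_cons_id {qlow name nid : String} {t : List (String × String)}
    (hid : PySem.Str.startswith name "__id_" = true) :
    pvPass1 qlow ((name, nid) :: t) = pvPass1 qlow t := by
  simp only [pvPass1]; rw [if_pos hid]

lemma pass1_cons {qlow name nid : String} {t : List (String × String)}
    (hid : PySem.Str.startswith name "__id_" = false) :
    pvPass1 qlow ((name, nid) :: t)
      = if PySem.Str.lower name == qlow then some nid else pvPass1 qlow t := by
  simp only [pvPass1]; rw [if_neg (by simp only [hid]; exact Bool.false_ne_true)]

lemma pass2_cons_id {qnorm name nid : String} {t : List (String × String)}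
    (hid : PySem.Str.startswith name "__id_" = true) :
    pvPass2 qnorm ((name, nid) :: t) = pvPass2 qnorm t := by
  simp only [pvPass2]; rw [if_pos hid]

lemma pass2_cons {qnorm name nid : String} {t : List (String × String)}
    (hid : PySem.Str.startswith name "__id_" = false) :
    pvPass2 qnorm ((name, nid) :: t)
      = if pvNorm name == qnorm then some nid else pvPass2 qnorm t := by
  simp only [pvPass2]; rw [if_neg (by simp only [hid]; exact Bool.false_ne_true)]

lemma matchesF_cons_id {qnorm name nid : String} {t : List (String × String)}
    (hid : PySem.Str.startswith name "__id_" = true) :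
    pvMatchesF qnorm ((name, nid) :: t) = pvMatchesF qnorm t := by
  simp only [pvMatchesF, List.filter_cons, hid, Bool.not_true, Bool.false_and,
    Bool.false_eq_true, if_false]


lemma matchesF_cons {qnorm name nid : String} {t : List (String × String)}
    (hid : PySem.Str.startswith name "__id_" = false) :
    pvMatchesF qnorm ((name, nid) :: t)
      = if PySem.Str.isIn qnorm (pvNorm name) || PySem.Str.isIn (pvNorm name) qnorm
        then (name, nid) :: pvMatchesF qnorm t else pvMatchesF qnorm t := by
  simp only [pvMatchesF, List.filter_cons, hid, Bool.not_false, Bool.true_and]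

lemma step_id {qlow qnorm name nid : String} {st : Option String × Option String × Option (Int × String)}
    (hid : PySem.Str.startswith name "__id_" = true) :
    pvStep qlow qnorm st (name, nid) = st := by
  simp only [pvStep]; rw [if_pos hid]

lemma step_go {qlow qnorm name nid : String} {st : Option String × Option String × Option (Int × String)}
    (hid : PySem.Str.startswith name "__id_" = false) :
    pvStep qlow qnorm st (name, nid)
      = (if st.1.isNone && (PySem.Str.lower name == qlow) then some nid else st.1,
         if st.2.1.isNone && (pvNorm name == qnorm) then some nid else st.2.1,
         if PySem.Str.isIn qnorm (pvNorm name) || PySem.Str.isIn (pvNorm name) qnorm then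
           match st.2.2 with
           | none => some (PySem.Str.len name, nid)
           | some q => if PySem.Str.len name < q.1 then some (PySem.Str.len name, nid) else st.2.2
         else st.2.2) := by
  simp only [pvStep]; rw [if_neg (by simp only [hid]; exact Bool.false_ne_true)]

-- head of the running insertion sort corresponds to B's running best
lemma head_insertBy_foldl (ms : List (String × String)) : ∀ (ys : List (String × String)),
    (ms.foldl (fun acc x => PySem.List.insertBy (fun a b => decide (pvKlen a < pvKlen b)) x acc) ys).head?.map pvKV
      = ms.foldl pvMin (ys.head?.map pvKV) := by
  induction ms with
  | nil => intro ys; rfl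
  | cons x t ih =>
    intro ys
    simp only [List.foldl_cons, ih]
    congr 1
    cases ys with
    | nil => rfl
    | cons y ys' =>
      simp only [PySem.List.insertBy]
      by_cases h : pvKlen x < pvKlen y
      · simp [h, pvMin, pvKV]
      · simp [h, pvMin, pvKV]

-- head of the stable sort by len(name) is B's fold-min
lemma sorted_head_eq_min (ms : List (String × String)) :
    (PySem.List.sorted ms (fun x => PySem.Str.len x.1)).head?.map pvKV = ms.foldl pvMin none := by
  rw [PySem.List.sorted_eq_foldl_insertBy]
  exact head_insertBy_foldl ms []

-- A's append loop builds exactly the filter pvMatchesF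
lemma matchesA_eq_filter (qnorm : String) (cm : List (String × String)) : ∀ acc,
    cm.foldl (fun acc p =>
        if PySem.Str.startswith p.1 "__id_" then acc
        else if PySem.Str.isIn qnorm (pvNorm p.1) || PySem.Str.isIn (pvNorm p.1) qnorm then acc ++ [p]
        else acc) acc = acc ++ pvMatchesF qnorm cm := by
  induction cm with
  | nil => intro acc; simp [pvMatchesF]
  | cons p t ih =>
    intro acc
    obtain ⟨name, nid⟩ := p
    simp only [List.foldl_cons]
    by_cases hid : PySem.Str.startswith name "__id_"
    · rw [if_pos hid, ih, matchesF_cons_id hid]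
    · rw [if_neg hid, matchesF_cons (Bool.eq_false_iff.mpr hid)]
      by_cases hc : (PySem.Str.isIn qnorm (pvNorm name) || PySem.Str.isIn (pvNorm name) qnorm) = true
      · rw [if_pos hc, if_pos hc, ih]; simp
      · rw [if_neg hc, if_neg hc, ih]

-- B's loop invariant: first exact match, first normalized match, running min of the matches
lemma loop_inv (qlow qnorm : String) (cm : List (String × String)) :
    ∀ (e n : Option String) (b : Option (Int × String)),
    cm.foldl (pvStep qlow qnorm) (e, n, b)
      = (e.or (pvPass1 qlow cm), n.or (pvPass2 qnorm cm), (pvMatchesF qnorm cm).foldl pvMin b) := by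
  induction cm with
  | nil => intro e n b; simp [pvPass1, pvPass2, pvMatchesF]
  | cons p t ih =>
    intro e n b
    obtain ⟨name, nid⟩ := p
    simp only [List.foldl_cons]
    by_cases hid : PySem.Str.startswith name "__id_"
    · rw [step_id hid, ih, pass1_cons_id hid, pass2_cons_id hid, matchesF_cons_id hid]
    · have hid' : PySem.Str.startswith name "__id_" = false := by simpa using hid
      rw [step_go hid', ih, pass1_cons hid', pass2_cons hid', matchesF_cons hid']
      refine congrArg₂ _ ?_ (congrArg₂ _ ?_ ?_)
      · cases e <;> cases hq : (PySem.Str.lower name == qlow) <;> simp_all [Option.or]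
      · cases n <;> cases hq : (pvNorm name == qnorm) <;> simp_all [Option.or]
      · by_cases hc : (PySem.Str.isIn qnorm (pvNorm name) || PySem.Str.isIn (pvNorm name) qnorm) = true
        · rw [if_pos hc, if_pos hc, List.foldl_cons]
          cases b <;> rfl
        · rw [if_neg hc, if_neg hc]

-- ===== VERDICT (by name: the statement is the Claim_ definition above) =====
theorem fuzzy_match_component_spec : Claim_equal_fuzzy_match_component := by
  intro query cm _
  unfold Spec_fuzzy_match_component fuzzy_match_component fuzzy_match_component_alt
  rw [loop_inv, matchesA_eq_filter]
  simp only [Option.none_or, List.nil_append]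
  cases pvPass1 (PySem.Str.lower query) cm with
  | some r => rfl
  | none =>
    cases pvPass2 (pvNorm query) cm with
    | some r => rfl
    | none =>
      have h := sorted_head_eq_min (pvMatchesF (pvNorm query) cm)
      cases hs : PySem.List.sorted (pvMatchesF (pvNorm query) cm) (fun x => PySem.Str.len x.1) with
      | nil =>
        rw [hs] at h
        simp only [List.head?_nil, Option.map_none] at h
        rw [← h]
        rfl
      | cons m rest =>
        rw [hs] at h
        simp only [List.head?_cons, Option.map_some] at h
        rw [← h]
        rfl
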